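-- pv_equiv track=rewrite | github.com/y-ogi/zmk-keyboard-cornix | tools/vial_to_zmk.py | format_bindings
-- ===== SOURCE A (Python) =====
-- from typing import Dict, List, Tuple
--
-- def format_bindings(bindings: List[str], layout: List[Dict], base_indent: str) -> str:
--     rows: Dict[int, List[str]] = {}
--     for key, pos in zip(bindings, layout):
--         rows.setdefault(pos["row"], []).append(key)
--     lines = []
--     for row in sorted(rows.keys()):
--         lines.append(base_indent + " ".join(rows[row]))
--     return "\n".join(lines)
-- ===== SOURCE B (Python) =====
-- def format_bindings(bindings, layout, base_indent):
--     pairs = [(key, pos["row"]) for key, pos in zip(bindings, layout)]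
--     row_order = sorted({r for _, r in pairs})
--     return "\n".join(
--         base_indent + " ".join(k for k, r in pairs if r == row)
--         for row in row_order
--     )
-- ===== Notes on version B (the rewrite author's own statement) =====
-- stated objective: alternative
-- what changed: Replaces A's mutable dict-of-lists index plus a separate sorted-keys lookup loop with a dict-free pipeline: materialise (key,row) pairs once, sort the distinct rows, and emit each line by filtering the pair list per row.
import Mathlib
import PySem

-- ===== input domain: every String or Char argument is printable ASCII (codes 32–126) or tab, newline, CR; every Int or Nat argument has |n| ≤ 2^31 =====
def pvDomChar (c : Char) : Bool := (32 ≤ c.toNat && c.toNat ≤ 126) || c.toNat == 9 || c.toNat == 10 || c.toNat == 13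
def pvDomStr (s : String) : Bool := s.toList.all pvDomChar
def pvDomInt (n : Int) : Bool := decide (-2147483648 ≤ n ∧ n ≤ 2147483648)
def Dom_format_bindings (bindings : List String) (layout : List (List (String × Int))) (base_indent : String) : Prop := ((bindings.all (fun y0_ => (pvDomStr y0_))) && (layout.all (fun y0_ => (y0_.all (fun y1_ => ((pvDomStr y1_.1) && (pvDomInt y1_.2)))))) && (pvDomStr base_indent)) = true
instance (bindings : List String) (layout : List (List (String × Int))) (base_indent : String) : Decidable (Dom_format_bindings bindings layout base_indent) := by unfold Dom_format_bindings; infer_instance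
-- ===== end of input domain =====

-- B replaces A's mutable dict-of-lists index (plus a separate sorted-keys lookup loop) with a
-- dict-free pipeline: (key,row) pairs once, sorted distinct rows, one filter pass per row
-- (objective: alternative; same results, no speed claim).

-- pos["row"]: first-match lookup in the dict pos; KeyError (none) is excluded by Pre_, default irrelevant there
def pvRowOf (pos : List (String × Int)) : Int :=
  ((PySem.Dict.mk pos).get? "row").getD 0

-- ===== PORT A =====
def format_bindings (bindings : List String) (layout : List (List (String × Int))) (base_indent : String) : String :=
  let rows : PySem.Dict Int (List String) :=
    (List.zip bindings layout).foldl
      (fun d kp => d.modify (pvRowOf kp.2) [] (fun v => v ++ [kp.1])) PySem.Dict.empty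
  let lines : List String :=
    (PySem.List.sorted rows.keys (fun r => r) false).map
      (fun row => base_indent ++ PySem.Str.join " " (rows.getD row []))
  PySem.Str.join "\n" lines

-- ===== PORT B =====
def format_bindings_alt (bindings : List String) (layout : List (List (String × Int))) (base_indent : String) : String :=
  let pairs : List (String × Int) :=
    (List.zip bindings layout).map (fun kp => (kp.1, pvRowOf kp.2))
  let rowOrder : List Int :=
    PySem.List.sorted (PySem.Set.ofList (pairs.map (fun p => p.2))) (fun r => r) false
  PySem.Str.join "\n" (rowOrder.map (fun row =>
    base_indent ++ PySem.Str.join " " ((pairs.filter (fun p => p.2 == row)).map (fun p => p.1))))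

-- ===== PRECONDITION & SPEC =====
-- Pre_ excludes exactly the inputs where Python A raises KeyError: a layout entry zipped with a
-- binding that has no "row" key (B raises there too).
def Pre_format_bindings (bindings : List String) (layout : List (List (String × Int))) (base_indent : String) : Prop :=
  ∀ kp ∈ List.zip bindings layout, (((PySem.Dict.mk kp.2).get? "row").isSome : Prop)
instance (bindings : List String) (layout : List (List (String × Int))) (base_indent : String) : Decidable (Pre_format_bindings bindings layout base_indent) := by unfold Pre_format_bindings; infer_instance

def pvWitness_format_bindings : List String × (List (List (String × Int))) × String :=
  (["&kp A", "&kp B", "&kp C"], [[("row", 1)], [("row", 0)], [("row", 1)]], "  ")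

def Spec_format_bindings (bindings : List String) (layout : List (List (String × Int))) (base_indent : String) (out : String) : Prop := out = format_bindings_alt bindings layout base_indent
instance (bindings : List String) (layout : List (List (String × Int))) (base_indent : String) (out : String) : Decidable (Spec_format_bindings bindings layout base_indent out) := by unfold Spec_format_bindings; infer_instance

-- ===== CLAIM (what is proved, stated in full; the proofs are below) =====
def Claim_equal_format_bindings : Prop := ∀ (bindings : List String) (layout : List (List (String × Int))) (base_indent : String), Dom_format_bindings bindings layout base_indent → Pre_format_bindings bindings layout base_indent → Spec_format_bindings bindings layout base_indent (format_bindings bindings layout base_indent)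

-- ===== LEMMAS AND PROOFS =====

-- A's grouping dict, looked up at row r, holds exactly the zipped keys whose layout row is r.
theorem pv_rows_getD (zs : List (String × List (String × Int))) (r : Int) :
    (zs.foldl (fun d kp => d.modify (pvRowOf kp.2) [] (fun v => v ++ [kp.1]))
      (PySem.Dict.empty : PySem.Dict Int (List String))).getD r []
    = ((zs.filter (fun kp => pvRowOf kp.2 == r)).map (fun kp => kp.1)) := by
  have h := PySem.Dict.getD_foldl_modify_append
      (zs.map (fun kp => (pvRowOf kp.2, kp.1)))
      (PySem.Dict.empty : PySem.Dict Int (List String)) r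
  rw [List.foldl_map] at h
  simpa [List.filter_map, Function.comp] using h

-- A's dict keys are the distinct rows in first-occurrence order.
theorem pv_rows_keys (zs : List (String × List (String × Int))) :
    (zs.foldl (fun d kp => d.modify (pvRowOf kp.2) [] (fun v => v ++ [kp.1]))
      (PySem.Dict.empty : PySem.Dict Int (List String))).keys
    = PySem.Set.ofList (zs.map (fun kp => pvRowOf kp.2)) := by
  have h := PySem.Dict.keys_foldl_modify_key zs (fun kp => pvRowOf kp.2) []
      (fun _ kp v => v ++ [kp.1]) (PySem.Dict.empty : PySem.Dict Int (List String))
  exact h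

-- ===== VERDICT (by name: the statement is the Claim_ definition above) =====
theorem format_bindings_spec : Claim_equal_format_bindings := by
  intro bindings layout base_indent _ _
  unfold Spec_format_bindings format_bindings format_bindings_alt
  simp only [pv_rows_getD, pv_rows_keys, List.map_map, List.filter_map]
  rfl
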